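-- pv_equiv track=rewrite | github.com/Haizhouzhou/stn | scripts/phase6a0_burden_viability.py | select_model_features
-- ===== SOURCE A (Python) =====
-- from collections import Counter, defaultdict
-- from typing import Any, Iterable
--
-- DEFAULT_MODEL_FEATURE_CAP = 96
--
-- def select_model_features(allowed: list[str], metadata: dict[str, dict[str, Any]], cap: int = DEFAULT_MODEL_FEATURE_CAP) -> list[str]:
--     if len(allowed) <= cap:
--         return allowed
--     by_family: dict[str, list[str]] = defaultdict(list)
--     for col in allowed:
--         family = str(metadata.get(col, {}).get("feature_family", "") or col.split("__", 1)[0])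
--         by_family[family].append(col)
--     selected: list[str] = []
--     family_order = sorted(by_family, key=lambda fam: (-len(by_family[fam]), fam))
--     while len(selected) < cap:
--         added = False
--         for family in family_order:
--             items = by_family[family]
--             if items:
--                 selected.append(items.pop(0))
--                 added = True
--                 if len(selected) >= cap:
--                     break
--         if not added:
--             break
--     return selected
-- ===== SOURCE B (Python) =====
-- from itertools import chain, zip_longest, islice
-- from collections import defaultdict
--
-- DEFAULT_MODEL_FEATURE_CAP = 96
--
-- def select_model_features(allowed, metadata, cap=DEFAULT_MODEL_FEATURE_CAP):
--     if len(allowed) <= cap: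
--         return allowed
--     by_family = defaultdict(list)
--     for col in allowed:
--         family = str(metadata.get(col, {}).get("feature_family", "") or col.split("__", 1)[0])
--         by_family[family].append(col)
--     family_order = sorted(by_family, key=lambda fam: (-len(by_family[fam]), fam))
--     family_lists = [by_family[f] for f in family_order]
--     flat = (x for x in chain.from_iterable(zip_longest(*family_lists)) if x is not None)
--     return list(islice(flat, max(cap, 0)))
-- ===== Notes on version B (the rewrite author's own statement) =====
-- stated objective: idiomatic
-- what changed: Replaces A's stateful while-loop that round-robins by popping items.pop(0) from the per-family dict lists with a declarative pipeline: transpose the family lists into rounds with itertools.zip_longest, flatten with chain.from_iterable, drop the None padding, and take the first max(cap, 0) items with islice.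
import Mathlib
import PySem

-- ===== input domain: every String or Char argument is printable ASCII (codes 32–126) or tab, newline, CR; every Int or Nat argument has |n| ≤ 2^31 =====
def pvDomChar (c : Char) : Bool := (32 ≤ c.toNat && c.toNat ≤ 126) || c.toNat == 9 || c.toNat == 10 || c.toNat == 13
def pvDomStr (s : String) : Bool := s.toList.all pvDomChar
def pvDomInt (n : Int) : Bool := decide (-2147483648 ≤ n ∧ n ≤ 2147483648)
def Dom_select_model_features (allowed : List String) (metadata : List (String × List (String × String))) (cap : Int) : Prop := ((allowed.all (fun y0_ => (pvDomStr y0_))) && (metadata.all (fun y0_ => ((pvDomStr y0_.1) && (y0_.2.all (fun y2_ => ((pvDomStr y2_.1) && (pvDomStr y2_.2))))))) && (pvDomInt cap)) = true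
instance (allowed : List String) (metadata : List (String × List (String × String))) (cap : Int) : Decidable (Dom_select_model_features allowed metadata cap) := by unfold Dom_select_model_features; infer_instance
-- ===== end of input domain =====

-- B replaces A's stateful while/pop(0) round-robin with a transpose (zip_longest), flatten, filter and take; objective: idiomatic.

-- shared grouping helpers (identical lines of Python in A and in B, per the task):
-- family = str(metadata.get(col, {}).get("feature_family", "") or col.split("__", 1)[0])
-- split("__", 1) with a nonempty separator always yields a nonempty list, so [0] is its head (headD never uses its default).
def pvFam (metadata : List (String × List (String × String))) (col : String) : String :=
  let fam := (PySem.Dict.mk ((PySem.Dict.mk metadata).getD col [])).getD "feature_family" ""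
  if fam ≠ "" then fam else ((PySem.Str.splitMax? col "__" 1).getD []).headD ""

-- by_family = defaultdict(list); for col in allowed: by_family[family].append(col)
def pvGroup (allowed : List String) (metadata : List (String × List (String × String))) :
    PySem.Dict String (List String) :=
  allowed.foldl (fun d col => d.modify (pvFam metadata col) [] (fun v => v ++ [col])) PySem.Dict.empty

-- family_order = sorted(by_family, key=lambda fam: (-len(by_family[fam]), fam))
def pvOrder (d : PySem.Dict String (List String)) : List String :=
  PySem.List.sorted2 d.keys (fun fam => -(((d.getD fam []).length : Int))) (fun fam => fam)

-- ===== PORT A =====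
-- the inner 'for family in family_order' pass: pop the head of each nonempty family list,
-- appending to selected, breaking as soon as len(selected) >= cap; returns (dict, selected, added)
def pvInnerA (cap : Int) : List String → PySem.Dict String (List String) → List String → Bool →
    PySem.Dict String (List String) × List String × Bool
  | [], d, sel, added => (d, sel, added)
  | f :: rest, d, sel, added =>
    match d.getD f [] with
    | [] => pvInnerA cap rest d sel added
    | x :: xs =>
      let d' := d.insert f xs
      let sel' := sel ++ [x]
      if cap ≤ (sel'.length : Int) then (d', sel', true)
      else pvInnerA cap rest d' sel' true

-- the 'while len(selected) < cap' loop; fuel is a totality guard only (each productive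
-- iteration pops at least one grouped item, so grouped-items + 1 iterations always suffice)
def pvWhileA (cap : Int) (order : List String) : Nat → PySem.Dict String (List String) → List String → List String
  | 0, _, sel => sel
  | fuel+1, d, sel =>
    if (sel.length : Int) < cap then
      match pvInnerA cap order d sel false with
      | (d', sel', added) => if added then pvWhileA cap order fuel d' sel' else sel'
    else sel

def select_model_features (allowed : List String) (metadata : List (String × List (String × String))) (cap : Int) : List String :=
  if (allowed.length : Int) ≤ cap then allowed
  else
    let d := pvGroup allowed metadata
    let order := pvOrder d
    pvWhileA cap order ((order.map (fun f => (d.getD f []).length)).sum + 1) d []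

-- ===== PORT B =====
-- termination measure fact for pvZipLongest, cited by its decreasing_by
theorem pvTailSum_le (ls : List (List String)) :
    ((ls.map List.tail).map List.length).sum ≤ (ls.map List.length).sum := by
  induction ls with
  | nil => simp
  | cons l t ih =>
    simp only [List.map_cons, List.sum_cons, List.length_tail]
    omega

theorem pvTailSum_lt (ls : List (List String)) (h : ¬ ls.all List.isEmpty = true) :
    ((ls.map List.tail).map List.length).sum < (ls.map List.length).sum := by
  induction ls with
  | nil => simp at h
  | cons l t ih =>
    simp only [List.all_cons, Bool.and_eq_true, not_and_or] at h
    simp only [List.map_cons, List.sum_cons, List.length_tail]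
    rcases h with h | h
    · have : 0 < l.length := by cases l with
        | nil => simp at h
        | cons a b => simp
      have := pvTailSum_le t
      omega
    · have := ih h
      omega

-- zip_longest(*family_lists) with fillvalue None: rows of next-elements (None once a list is
-- exhausted) until every list is exhausted
def pvZipLongest (ls : List (List String)) : List (List (Option String)) :=
  if h : ls.all List.isEmpty then []
  else (ls.map List.head?) :: pvZipLongest (ls.map List.tail)
termination_by (ls.map List.length).sum
decreasing_by simpa using pvTailSum_lt ls h

def select_model_features_alt (allowed : List String) (metadata : List (String × List (String × String))) (cap : Int) : List String :=
  if (allowed.length : Int) ≤ cap then allowed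
  else
    let d := pvGroup allowed metadata
    let order := pvOrder d
    let familyLists := order.map (fun f => d.getD f [])
    -- chain.from_iterable → flatten; drop the None padding → filterMap id; islice(·, max(cap,0)) → take
    ((pvZipLongest familyLists).flatten.filterMap id).take (max cap 0).toNat

-- ===== PRECONDITION & SPEC =====
def Spec_select_model_features (allowed : List String) (metadata : List (String × List (String × String))) (cap : Int) (out : List String) : Prop := out = select_model_features_alt allowed metadata cap
instance (allowed : List String) (metadata : List (String × List (String × String))) (cap : Int) (out : List String) : Decidable (Spec_select_model_features allowed metadata cap out) := by unfold Spec_select_model_features; infer_instance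

-- ===== CLAIM (what is proved, stated in full; the proofs are below) =====
def Claim_equal_select_model_features : Prop := ∀ (allowed : List String) (metadata : List (String × List (String × String))) (cap : Int), Dom_select_model_features allowed metadata cap → Spec_select_model_features allowed metadata cap (select_model_features allowed metadata cap)

-- ===== LEMMAS AND PROOFS =====

-- pure model of one pass of A's inner loop, over the family lists in order
def pvPassP (cap : Int) : List (List String) → List String → Bool →
    List (List String) × List String × Bool
  | [], sel, added => ([], sel, added)
  | [] :: ls, sel, added =>
    let r := pvPassP cap ls sel added
    ([] :: r.1, r.2)
  | (x :: xs) :: ls, sel, added =>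
    let sel' := sel ++ [x]
    if cap ≤ (sel'.length : Int) then (xs :: ls, sel', true)
    else
      let r := pvPassP cap ls sel' true
      (xs :: r.1, r.2)

-- pure model of A's while loop
def pvWhileP (cap : Int) : Nat → List (List String) → List String → List String
  | 0, _, sel => sel
  | fuel+1, ls, sel =>
    if (sel.length : Int) < cap then
      let r := pvPassP cap ls sel false
      if r.2.2 then pvWhileP cap fuel r.1 r.2.1 else r.2.1
    else sel

-- A's inner pass never touches keys outside its order list
theorem pvInnerA_getD_of_not_mem (cap : Int) (order : List String) :
    ∀ (d : PySem.Dict String (List String)) (sel : List String) (a : Bool) (g : String),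
      g ∉ order → (pvInnerA cap order d sel a).1.getD g [] = d.getD g [] := by
  induction order with
  | nil => intro d sel a g _; simp [pvInnerA]
  | cons f rest ih =>
    intro d sel a g hg
    have hgf : g ≠ f := by intro h; exact hg (h ▸ List.mem_cons_self)
    have hgrest : g ∉ rest := fun h => hg (List.mem_cons_of_mem _ h)
    simp only [pvInnerA]
    cases hdf : d.getD f [] with
    | nil => exact ih d sel a g hgrest
    | cons x xs =>
      simp only
      split
      · exact PySem.Dict.getD_insert_of_ne _ _ _ hgf
      · rw [ih _ _ _ _ hgrest, PySem.Dict.getD_insert_of_ne _ _ _ hgf]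

-- simulation: A's dict-mutating pass equals the pure pass on the lists read off the dict
theorem pvInnerA_eq_passP (cap : Int) (order : List String) (hnd : order.Nodup) :
    ∀ (d : PySem.Dict String (List String)) (sel : List String) (a : Bool),
      (pvInnerA cap order d sel a).2 = (pvPassP cap (order.map (fun f => d.getD f [])) sel a).2
    ∧ order.map (fun f => (pvInnerA cap order d sel a).1.getD f []) =
        (pvPassP cap (order.map (fun f => d.getD f [])) sel a).1 := by
  induction order with
  | nil => intro d sel a; simp [pvInnerA, pvPassP]
  | cons f rest ih =>
    intro d sel a
    have hf : f ∉ rest := (List.nodup_cons.mp hnd).1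
    have hndr : rest.Nodup := (List.nodup_cons.mp hnd).2
    simp only [pvInnerA, List.map_cons]
    cases hdf : d.getD f [] with
    | nil =>
      simp only [pvPassP]
      constructor
      · exact (ih hndr d sel a).1
      · rw [pvInnerA_getD_of_not_mem cap rest d sel a f hf, hdf]
        exact congrArg _ ((ih hndr d sel a).2)
    | cons x xs =>
      simp only [pvPassP]
      split
      · constructor
        · rfl
        · simp only [List.cons.injEq]
          refine ⟨PySem.Dict.getD_insert_self _ _ _ _, ?_⟩
          exact List.map_congr_left (fun g hg =>
            PySem.Dict.getD_insert_of_ne _ _ _ (fun h => hf (h ▸ hg)))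
      · have hmap : rest.map (fun g => (d.insert f xs).getD g []) = rest.map (fun g => d.getD g []) :=
          List.map_congr_left (fun g hg => PySem.Dict.getD_insert_of_ne _ _ _ (fun h => hf (h ▸ hg)))
        have := ih hndr (d.insert f xs) (sel ++ [x]) true
        rw [hmap] at this
        refine ⟨this.1, ?_⟩
        simp only [List.cons.injEq]
        constructor
        · rw [pvInnerA_getD_of_not_mem cap rest _ _ _ f hf, PySem.Dict.getD_insert_self]
        · exact this.2

-- simulation lifted to the while loop
theorem pvWhileA_eq_whileP (cap : Int) (order : List String) (hnd : order.Nodup) :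
    ∀ (fuel : Nat) (d : PySem.Dict String (List String)) (sel : List String),
      pvWhileA cap order fuel d sel = pvWhileP cap fuel (order.map (fun f => d.getD f [])) sel := by
  intro fuel
  induction fuel with
  | zero => intro d sel; rfl
  | succ n ih =>
    intro d sel
    simp only [pvWhileA, pvWhileP]
    split
    · rcases hA : pvInnerA cap order d sel false with ⟨d', sel', added⟩
      have h := pvInnerA_eq_passP cap order hnd d sel false
      rw [hA] at h
      rw [← h.1, ← h.2]
      cases added with
      | false => rfl
      | true => exact ih d' sel'
    · rfl

-- characterisation of one pure pass: it appends the first k nonempty heads,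
-- reports whether anything was added, pops exactly min k |heads| items, and
-- equals the full tail-map when the cap is not reached
theorem pvPassP_spec (cap : Int) :
    ∀ (ls : List (List String)) (sel : List String) (a : Bool),
      (sel.length : Int) < cap →
      (pvPassP cap ls sel a).2.1 = sel ++ (ls.filterMap List.head?).take (cap - sel.length).toNat
    ∧ (pvPassP cap ls sel a).2.2 = (a || !(ls.filterMap List.head?).isEmpty)
    ∧ (ls.map List.length).sum =
        ((pvPassP cap ls sel a).1.map List.length).sum +
          min (cap - sel.length).toNat (ls.filterMap List.head?).length
    ∧ ((ls.filterMap List.head?).length < (cap - sel.length).toNat →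
        (pvPassP cap ls sel a).1 = ls.map List.tail) := by
  intro ls
  induction ls with
  | nil => intro sel a hsel; simp [pvPassP]
  | cons l ls ih =>
    intro sel a hsel
    cases l with
    | nil =>
      obtain ⟨h1, h2, h3, h4⟩ := ih sel a hsel
      simp only [pvPassP, List.filterMap_cons, List.head?_nil, List.map_cons, List.sum_cons,
        List.tail_nil, List.length_nil]
      exact ⟨h1, h2, by omega, fun h => by rw [h4 h]⟩
    | cons x xs =>
      have hk1 : 1 ≤ (cap - sel.length).toNat := by omega
      simp only [pvPassP, List.filterMap_cons, List.head?_cons, List.map_cons, List.sum_cons,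
        List.tail_cons, List.length_cons]
      split
      next hbreak =>
        rw [List.length_append, List.length_singleton] at hbreak
        have hk : (cap - sel.length).toNat = 1 := by omega
        refine ⟨?_, by simp, ?_, ?_⟩
        · rw [hk]
          simp [List.take_succ_cons]
        · simp only [List.map_cons, List.sum_cons, hk]
          omega
        · intro h
          rw [hk] at h
          simp at h
      next hnob =>
        rw [List.length_append, List.length_singleton] at hnob
        have hsel' : (((sel ++ [x]).length : Nat) : Int) < cap := by
          rw [List.length_append, List.length_singleton]; push_cast at hnob ⊢; omega
        obtain ⟨h1, h2, h3, h4⟩ := ih (sel ++ [x]) true hsel'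
        have hklen : ((sel ++ [x]).length : Nat) = sel.length + 1 := by
          rw [List.length_append, List.length_singleton]
        have hk' : (cap - ((sel ++ [x]).length : Int)).toNat = (cap - sel.length).toNat - 1 := by
          rw [hklen]; push_cast; omega
        refine ⟨?_, by rw [h2]; simp, ?_, ?_⟩
        · obtain ⟨n, hn⟩ : ∃ n, (cap - (sel.length : Int)).toNat = n + 1 :=
            ⟨(cap - (sel.length : Int)).toNat - 1, by omega⟩
          rw [h1, hk', hn, Nat.add_sub_cancel, List.take_succ_cons, List.append_assoc,
            List.singleton_append]
        · simp only [List.map_cons, List.sum_cons]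
          rw [hk'] at h3
          omega
        · intro h
          have hlt : (ls.filterMap List.head?).length < (cap - ((sel ++ [x]).length : Int)).toNat := by
            rw [hk']; omega
          rw [h4 hlt]

def pvFlatFilter (ls : List (List String)) : List String :=
  (pvZipLongest ls).flatten.filterMap id

theorem pvFlatFilter_nil (ls : List (List String)) (h : ls.all List.isEmpty = true) :
    pvFlatFilter ls = [] := by
  unfold pvFlatFilter pvZipLongest
  rw [dif_pos h]
  rfl

theorem pvFlatFilter_cons (ls : List (List String)) (h : ¬ ls.all List.isEmpty = true) :
    pvFlatFilter ls = ls.filterMap List.head? ++ pvFlatFilter (ls.map List.tail) := by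
  unfold pvFlatFilter
  conv_lhs => rw [pvZipLongest, dif_neg h]
  rw [List.flatten_cons, List.filterMap_append, List.filterMap_map]
  rfl

theorem pvHeads_nil_iff (ls : List (List String)) :
    ls.filterMap List.head? = [] ↔ ls.all List.isEmpty = true := by
  rw [List.filterMap_eq_nil_iff, List.all_eq_true]
  constructor
  · intro h l hl; have := h l hl; cases l with
    | nil => rfl
    | cons a b => simp at this
  · intro h l hl; have := h l hl; cases l with
    | nil => rfl
    | cons a b => simp at this

-- the pure while loop computes: append the round-robin flattening truncated at cap
theorem pvWhileP_spec (cap : Int) :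
    ∀ (fuel : Nat) (ls : List (List String)) (sel : List String),
      (ls.map List.length).sum < fuel →
      pvWhileP cap fuel ls sel = sel ++ (pvFlatFilter ls).take (cap - sel.length).toNat := by
  intro fuel
  induction fuel with
  | zero => intro ls sel h; omega
  | succ n ih =>
    intro ls sel hfuel
    simp only [pvWhileP]
    split
    next hsel =>
      obtain ⟨h1, h2, h3, h4⟩ := pvPassP_spec cap ls sel false hsel
      by_cases hH : ls.filterMap List.head? = []
      · have hfalse : (pvPassP cap ls sel false).2.2 = false := by
          rw [h2, hH]; simp
        rw [hfalse, if_neg (by simp), h1, hH,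
          pvFlatFilter_nil ls ((pvHeads_nil_iff ls).mp hH)]
      · have hHpos : 0 < (ls.filterMap List.head?).length := by
          cases hc : ls.filterMap List.head? with
          | nil => exact absurd hc hH
          | cons u v => simp
        have hadded : (pvPassP cap ls sel false).2.2 = true := by
          rw [h2]
          cases hc : ls.filterMap List.head? with
          | nil => exact absurd hc hH
          | cons u v => simp
        rw [hadded, if_pos rfl]
        have hnotall : ¬ ls.all List.isEmpty = true := fun hc => hH ((pvHeads_nil_iff ls).mpr hc)
        have hflat := pvFlatFilter_cons ls hnotall
        have hmin1 : 1 ≤ min (cap - (sel.length : Int)).toNat (ls.filterMap List.head?).length := by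
          omega
        have hbound : ((pvPassP cap ls sel false).1.map List.length).sum < n := by omega
        rw [ih (pvPassP cap ls sel false).1 (pvPassP cap ls sel false).2.1 hbound, h1]
        by_cases hcase : (ls.filterMap List.head?).length < (cap - (sel.length : Int)).toNat
        · rw [h4 hcase]
          have htakeH : (ls.filterMap List.head?).take (cap - (sel.length : Int)).toNat =
              ls.filterMap List.head? := List.take_of_length_le (le_of_lt hcase)
          rw [htakeH, hflat, List.take_append]
          have hlen2 : ((cap - ((sel ++ ls.filterMap List.head?).length : Int)).toNat) =
              (cap - (sel.length : Int)).toNat - (ls.filterMap List.head?).length := by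
            rw [List.length_append]; push_cast; omega
          rw [hlen2, List.append_assoc, htakeH]
        · have hlen3 : ((cap - (((sel ++ (ls.filterMap List.head?).take
              (cap - (sel.length : Int)).toNat).length) : Int)).toNat) = 0 := by
            rw [List.length_append, List.length_take]; push_cast; omega
          rw [hlen3, List.take_zero, List.append_nil, hflat, List.take_append]
          have hlen4 : (cap - (sel.length : Int)).toNat - (ls.filterMap List.head?).length = 0 := by
            omega
          rw [hlen4, List.take_zero, List.append_nil]
    next hsel =>
      have : (cap - (sel.length : Int)).toNat = 0 := by omega
      rw [this, List.take_zero, List.append_nil]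

-- keys of the grouping dict are unique, hence so is the sorted family order
theorem pvOrder_nodup (allowed : List String) (metadata : List (String × List (String × String))) :
    (pvOrder (pvGroup allowed metadata)).Nodup := by
  have hkeys : (pvGroup allowed metadata).keys.Nodup :=
    PySem.Dict.nodup_keys_foldl_modify_key allowed (pvFam metadata) []
      (fun _ col => fun v => v ++ [col]) PySem.Dict.empty PySem.Dict.nodup_keys_empty
  exact (PySem.List.sorted2_perm _ _ _ _).symm.nodup hkeys

-- ===== VERDICT (by name: the statement is the Claim_ definition above) =====
theorem select_model_features_spec : Claim_equal_select_model_features := by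
  intro allowed metadata cap _
  unfold Spec_select_model_features select_model_features select_model_features_alt
  split
  · rfl
  · rw [pvWhileA_eq_whileP cap (pvOrder (pvGroup allowed metadata))
        (pvOrder_nodup allowed metadata)
        ((( pvOrder (pvGroup allowed metadata)).map
          (fun f => ((pvGroup allowed metadata).getD f []).length)).sum + 1)
        (pvGroup allowed metadata) []]
    rw [pvWhileP_spec cap _ _ _ (by rw [List.map_map]; exact Nat.lt_succ_self _)]
    have hmax : (max cap 0).toNat = cap.toNat := by omega
    simp only [List.length_nil, Nat.cast_zero, sub_zero, List.nil_append, hmax]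
    rfl
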